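-- pv_equiv track=rewrite | github.com/g-s01/data-programming-btp | gautam-results-and-analysis/raw-to-fine-direct/through-lfs/context-window-one/lfs_for_raw_sentence_gpt.py | label_sentence_Group_PublicCorp
-- ===== SOURCE A (Python) =====
-- ABSTAIN = -1
--
-- Group_PublicCorp = 9
--
-- def label_sentence_Group_PublicCorp(tokens):
--     """
--     Labels each token in a sentence as Group_PublicCorp if it indicates a publicly traded corporation or large company.
--     Returns ABSTAIN for tokens that do not match the category.
--
--     Args:
--     tokens: list of str - A list of words representing a sentence.
--
--     Returns:
--     list of str - A list of labels for each token.
--     """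
--     # Common public corporation indicators
--     public_corp_indicators = {
--         'corporation', 'company', 'inc', 'ltd', 'plc', 'group', 'corp', 'enterprise', 'holdings'
--     }
--     known_public_corp_names = {
--         'ecopetrol', 'john', 'deere', 'jr', 'east', 'oricon', 'cumulus', 'media', 'vf', 'disney',
--         'commonwealth', 'banking', 'ping', 'insurance', 'costco', 'hewlett-packard', 'marks',
--         'spencer', 'morgan', 'stanley'
--     }
--     public_corp_context = {
--         'owned', 'operated', 'managed', 'produced', 'purchased', 'expanded', 'founded', 'acquired',
--         'appointed', 'brand', 'partner', 'served', 'listed', 'stock', 'traded', 'shares', 'subsidiary'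
--     }
--
--     labels = []
--
--     for i, token in enumerate(tokens):
--         token_lower = token.lower()
--
--         # Check if the token or surrounding tokens suggest a public corporation
--         if (
--             token_lower in public_corp_indicators and (  # The token itself indicates a public corporation
--             token_lower in known_public_corp_names or  # Specific public corporation names
--             (i > 0 and tokens[i - 1].lower() in public_corp_indicators) or  # Preceded by a public corporation indicator
--             (i < len(tokens) - 1 and tokens[i + 1].lower() in public_corp_indicators) or  # Followed by a public corporation indicator
--             (i > 0 and tokens[i - 1].lower() in public_corp_context) or  # Preceded by a public corporation context keyword
--             (i < len(tokens) - 1 and tokens[i + 1].lower() in public_corp_context))  # Followed by a public corporation context keyword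
--         ):
--             labels.append(Group_PublicCorp)
--         else:
--             labels.append(ABSTAIN)  # Default to 'O' if no match is found
--
--     return labels
-- ===== SOURCE B (Python) =====
-- ABSTAIN = -1
--
-- Group_PublicCorp = 9
--
-- INDICATORS = frozenset({
--     'corporation', 'company', 'inc', 'ltd', 'plc', 'group', 'corp', 'enterprise', 'holdings'
-- })
-- TRIGGERS = INDICATORS | frozenset({
--     'owned', 'operated', 'managed', 'produced', 'purchased', 'expanded', 'founded', 'acquired',
--     'appointed', 'brand', 'partner', 'served', 'listed', 'stock', 'traded', 'shares', 'subsidiary'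
-- })
--
--
-- def label_sentence_Group_PublicCorp(tokens):
--     """
--     Streaming one-pass scan with a one-token delay buffer: each token's label is
--     emitted when its right neighbour arrives; a flag carries whether the token
--     before the buffered one was a trigger.  No random access into the list.
--     (A's known-company-names disjunct is dropped: that set is disjoint from the
--     indicator set, so the branch can never fire.)
--     """
--     labels = []
--     prev_trig = False     # was the token before `pending` a trigger word?
--     pending = None        # lowered token waiting to see its right neighbour
--     for tok in tokens:
--         w = tok.lower()
--         if pending is not None:
--             labels.append(Group_PublicCorp
--                           if pending in INDICATORS and (prev_trig or w in TRIGGERS)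
--                           else ABSTAIN)
--             prev_trig = pending in TRIGGERS
--         pending = w
--     if pending is not None:
--         labels.append(Group_PublicCorp
--                       if pending in INDICATORS and prev_trig
--                       else ABSTAIN)
--     return labels
-- ===== Notes on version B (the rewrite author's own statement) =====
-- stated objective: alternative
-- what changed: B is a streaming one-pass scan with a one-token delay buffer and a carried previous-trigger flag (no indexing into the list at all), and it drops A's known-company-names disjunct, which provably never fires because that set is disjoint from the indicator set.
import Mathlib
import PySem

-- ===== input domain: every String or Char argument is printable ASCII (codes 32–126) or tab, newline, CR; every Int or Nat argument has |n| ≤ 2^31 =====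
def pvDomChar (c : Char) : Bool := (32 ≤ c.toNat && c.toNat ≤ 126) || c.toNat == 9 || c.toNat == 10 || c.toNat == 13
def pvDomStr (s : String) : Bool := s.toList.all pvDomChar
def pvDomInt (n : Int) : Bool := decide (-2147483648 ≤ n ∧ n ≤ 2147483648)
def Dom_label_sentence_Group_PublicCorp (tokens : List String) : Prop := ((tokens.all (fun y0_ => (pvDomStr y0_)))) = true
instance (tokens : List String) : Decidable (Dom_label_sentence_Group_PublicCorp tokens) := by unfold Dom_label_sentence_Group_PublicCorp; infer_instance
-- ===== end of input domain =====

-- B replaces A's indexed loop with neighbour lookups by a streaming one-pass scan with a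
-- one-token delay buffer and a carried previous-trigger flag, dropping A's known-names
-- disjunct that provably never fires (objective: alternative decomposition, same cost).

-- ===== PORT A =====
-- the three set literals of the Python
def pcIndicators : List String :=
  ["corporation", "company", "inc", "ltd", "plc", "group", "corp", "enterprise", "holdings"]
def pcKnown : List String :=
  ["ecopetrol", "john", "deere", "jr", "east", "oricon", "cumulus", "media", "vf", "disney",
   "commonwealth", "banking", "ping", "insurance", "costco", "hewlett-packard", "marks",
   "spencer", "morgan", "stanley"]
def pcContext : List String :=
  ["owned", "operated", "managed", "produced", "purchased", "expanded", "founded", "acquired",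
   "appointed", "brand", "partner", "served", "listed", "stock", "traded", "shares", "subsidiary"]

-- A's big if-condition on (i, token); tokens[i-1]/tokens[i+1] are guarded in range, so pyGetD is exact
def pcCondA (tokens : List String) (i : Int) (token : String) : Bool :=
  let tl := PySem.Str.lower token
  pcIndicators.contains tl &&
    (pcKnown.contains tl ||
     (decide (i > 0) && pcIndicators.contains (PySem.Str.lower (PySem.List.pyGetD tokens (i - 1) ""))) ||
     (decide (i < (tokens.length : Int) - 1) && pcIndicators.contains (PySem.Str.lower (PySem.List.pyGetD tokens (i + 1) ""))) ||
     (decide (i > 0) && pcContext.contains (PySem.Str.lower (PySem.List.pyGetD tokens (i - 1) ""))) ||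
     (decide (i < (tokens.length : Int) - 1) && pcContext.contains (PySem.Str.lower (PySem.List.pyGetD tokens (i + 1) ""))))

def label_sentence_Group_PublicCorp (tokens : List String) : List Int :=
  (PySem.List.enumerate tokens).foldl
    (fun labels it => if pcCondA tokens it.1 it.2 then labels ++ [9] else labels ++ [-1]) []

-- ===== PORT B =====
-- TRIGGERS = INDICATORS | context set (disjoint literal sets, so append is the set union)
def pcTriggers : List String := pcIndicators ++ pcContext

-- one loop iteration of Source B: state = (labels, prev_trig, pending)
def pcStep (st : List Int × Bool × Option String) (tok : String) : List Int × Bool × Option String :=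
  let w := PySem.Str.lower tok
  match st with
  | (labels, prevTrig, none) => (labels, prevTrig, some w)
  | (labels, prevTrig, some p) =>
      (labels ++ [if pcIndicators.contains p && (prevTrig || pcTriggers.contains w) then (9 : Int) else -1],
       pcTriggers.contains p, some w)

-- Source B's final flush of the delay buffer
def pcFinish : List Int × Bool × Option String → List Int
  | (labels, _, none) => labels
  | (labels, prevTrig, some p) =>
      labels ++ [if pcIndicators.contains p && prevTrig then (9 : Int) else -1]

def label_sentence_Group_PublicCorp_alt (tokens : List String) : List Int :=
  pcFinish (tokens.foldl pcStep ([], false, none))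

-- ===== PRECONDITION & SPEC =====
def Spec_label_sentence_Group_PublicCorp (tokens : List String) (out : List Int) : Prop := out = label_sentence_Group_PublicCorp_alt tokens
instance (tokens : List String) (out : List Int) : Decidable (Spec_label_sentence_Group_PublicCorp tokens out) := by unfold Spec_label_sentence_Group_PublicCorp; infer_instance

-- ===== CLAIM (what is proved, stated in full; the proofs are below) =====
def Claim_equal_label_sentence_Group_PublicCorp : Prop := ∀ (tokens : List String), Dom_label_sentence_Group_PublicCorp tokens → Spec_label_sentence_Group_PublicCorp tokens (label_sentence_Group_PublicCorp tokens)

-- ===== LEMMAS AND PROOFS =====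

theorem portA_eq_map (tokens : List String) :
    label_sentence_Group_PublicCorp tokens =
      (PySem.List.enumerate tokens).map (fun it => if pcCondA tokens it.1 it.2 then (9 : Int) else -1) := by
  unfold label_sentence_Group_PublicCorp
  have h : (fun (labels : List Int) (it : Int × String) =>
      if pcCondA tokens it.1 it.2 then labels ++ [(9 : Int)] else labels ++ [-1]) =
      (fun labels it => labels ++ [if pcCondA tokens it.1 it.2 then (9 : Int) else -1]) := by
    funext labels it; split <;> rfl
  rw [h, PySem.List.foldl_append_singleton_eq_map]
  simp

theorem pyGetD_at (xs : List String) (i : Int) (k : Nat) (hik : i = (k : Int)) (hk : k < xs.length) :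
    PySem.List.pyGetD xs i "" = xs[k] := by
  subst hik; simp [PySem.List.pyGetD_natCast, hk]

-- reference recursion: pcRef prev ws = Source B's output on (already lowered) words ws,
-- prev = 'was the word before ws a trigger'
def pcHeadTrig : List String → Bool
  | [] => false
  | x :: _ => pcTriggers.contains x

def pcRef : Bool → List String → List Int
  | _, [] => []
  | prev, w :: ws =>
      (if pcIndicators.contains w && (prev || pcHeadTrig ws) then (9 : Int) else -1) ::
        pcRef (pcTriggers.contains w) ws

theorem foldB (ws : List String) : ∀ (labels : List Int) (prev : Bool) (p : String),
    pcFinish (ws.foldl pcStep (labels, prev, some p)) =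
      labels ++ pcRef prev (p :: ws.map PySem.Str.lower) := by
  induction ws with
  | nil => intro labels prev p; simp [pcFinish, pcRef, pcHeadTrig]
  | cons t ts ih =>
    intro labels prev p
    simp only [List.foldl_cons, pcStep]
    rw [ih]
    simp [pcRef, pcHeadTrig]

theorem altB_eq_ref (tokens : List String) :
    label_sentence_Group_PublicCorp_alt tokens = pcRef false (tokens.map PySem.Str.lower) := by
  cases tokens with
  | nil => rfl
  | cons t ts =>
    unfold label_sentence_Group_PublicCorp_alt
    simp only [List.foldl_cons, pcStep]
    rw [foldB]
    simp

theorem pcRef_length : ∀ (prev : Bool) (ws : List String), (pcRef prev ws).length = ws.length := by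
  intro prev ws
  induction ws generalizing prev with
  | nil => rfl
  | cons w ws ih => simp [pcRef, ih]

-- the per-index condition pcRef realises
def pcCondR (ws : List String) (prev : Bool) (i : Nat) : Bool :=
  pcIndicators.contains (ws.getD i "") &&
    ((if i = 0 then prev else pcTriggers.contains (ws.getD (i - 1) "")) ||
     (decide (i + 1 < ws.length) && pcTriggers.contains (ws.getD (i + 1) "")))

theorem pcRef_getElem : ∀ (ws : List String) (prev : Bool) (i : Nat) (h : i < ws.length),
    (pcRef prev ws)[i]'(by rw [pcRef_length]; exact h) =
      if pcCondR ws prev i then (9 : Int) else -1 := by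
  intro ws
  induction ws with
  | nil => intro _ i h; simp at h
  | cons w ws ih =>
    intro prev i h
    cases i with
    | zero =>
      cases ws with
      | nil => simp [pcRef, pcCondR, pcHeadTrig]
      | cons x xs => simp [pcRef, pcCondR, pcHeadTrig]
    | succ j =>
      have hj : j < ws.length := by simpa using h
      simp only [pcRef, List.getElem_cons_succ]
      rw [ih (pcTriggers.contains w) j hj]
      cases j with
      | zero =>
        simp [pcCondR, Nat.lt_iff_add_one_le]
      | succ k =>
        simp [pcCondR]

theorem ind_known_false (w : String) (h : w ∈ pcIndicators) : w ∉ pcKnown := by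
  simp only [pcIndicators, List.mem_cons, List.not_mem_nil, or_false] at h
  rcases h with rfl | rfl | rfl | rfl | rfl | rfl | rfl | rfl | rfl <;> decide

theorem condA_eq_condR (tokens : List String) (i : Nat) (h : i < tokens.length) :
    pcCondA tokens (i : Int) tokens[i] = pcCondR (tokens.map PySem.Str.lower) false i := by
  have hlow : ∀ (k : Nat) (hk : k < tokens.length),
      (tokens.map PySem.Str.lower).getD k "" = PySem.Str.lower (tokens[k]'hk) := by
    intro k hk
    rw [List.getD_eq_getElem _ _ (by simpa using hk)]
    simp
  by_cases hind : PySem.Str.lower (tokens[i]'h) ∈ pcIndicators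
  case neg =>
    simp only [pcCondA, pcCondR, hlow i h]
    simp [hind]
  case pos =>
    have hkn : PySem.Str.lower (tokens[i]'h) ∉ pcKnown := ind_known_false _ hind
    rcases Nat.eq_zero_or_pos i with h0 | h0
    · subst h0
      by_cases hb : 1 < tokens.length
      · have gnext : PySem.List.pyGetD tokens (((0:Nat):Int) + 1) "" = tokens[1] :=
          pyGetD_at tokens _ 1 (by omega) hb
        simp only [pcCondA, pcCondR, gnext, hlow 0 h, hlow 1 hb]
        simp [hind, hkn, hb, pcTriggers]
      · have hL : tokens.length = 1 := by omega
        simp only [pcCondA, pcCondR]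
        simp [hind, hkn, hL]
    · obtain ⟨j, rfl⟩ : ∃ j, i = j + 1 := ⟨i - 1, by omega⟩
      have hj : j < tokens.length := by omega
      have hpos : (0 : Int) < ((j : Int) + 1) := by omega
      have gprev : PySem.List.pyGetD tokens ((((j+1):Nat):Int) - 1) "" = tokens[j] :=
        pyGetD_at tokens _ j (by omega) hj
      by_cases hb : j + 2 < tokens.length
      · have hbi : ((j : Int) + 1) < (tokens.length : Int) - 1 := by omega
        have gnext : PySem.List.pyGetD tokens ((((j+1):Nat):Int) + 1) "" = tokens[j+2] :=
          pyGetD_at tokens _ (j + 2) (by omega) hb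
        have hlt : j + 1 + 1 < tokens.length := by omega
        simp only [pcCondA, pcCondR, gprev, gnext, hlow (j+1) h, hlow (j+2) hb]
        simp only [Nat.add_sub_cancel, hlow j hj]
        by_cases a1 : PySem.Str.lower (tokens[j]'hj) ∈ pcIndicators <;>
        by_cases c1 : PySem.Str.lower (tokens[j]'hj) ∈ pcContext <;>
        by_cases a2 : PySem.Str.lower (tokens[j+2]'hb) ∈ pcIndicators <;>
        by_cases c2 : PySem.Str.lower (tokens[j+2]'hb) ∈ pcContext <;>
        simp [hind, hkn, hpos, hbi, hlt, pcTriggers, a1, c1, a2, c2]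
      · have hbi : ¬ (((j : Int) + 1) < (tokens.length : Int) - 1) := by omega
        have hlt : ¬ (j + 1 + 1 < tokens.length) := by omega
        simp only [pcCondA, pcCondR, gprev, hlow (j+1) h]
        simp only [Nat.add_sub_cancel, hlow j hj]
        simp [hind, hkn, hpos, hbi, hlt, pcTriggers]

-- ===== VERDICT (by name: the statement is the Claim_ definition above) =====
theorem label_sentence_Group_PublicCorp_spec : Claim_equal_label_sentence_Group_PublicCorp := by
  intro tokens _
  unfold Spec_label_sentence_Group_PublicCorp
  rw [portA_eq_map, altB_eq_ref]
  apply List.ext_getElem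
  · simp [pcRef_length]
  · intro i h1 h2
    have hn : i < tokens.length := by simpa using h1
    simp only [List.getElem_map, PySem.List.getElem_enumerate, zero_add]
    rw [pcRef_getElem (tokens.map PySem.Str.lower) false i (by simpa using hn)]
    rw [condA_eq_condR tokens i hn]
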